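-- pv_equiv track=rewrite | github.com/nuagenetworks/nuage-openstack-neutron | nuage_neutron/sfc/nuage_sfc_plugin.py | _sfc_map_vsd_resource
-- ===== SOURCE A (Python) =====
-- def _sfc_map_vsd_resource(nuage_resources):
--     nuage_map = {}
--     for nuage_resource in nuage_resources:
--         resource_id = nuage_resource['name'].split('_')[-1]
--         if nuage_map.get(resource_id):
--             resource_list = nuage_map.get(resource_id)
--             resource_list.append(nuage_resource)
--             nuage_map[resource_id] = resource_list
--         else:
--             nuage_map[resource_id] = [nuage_resource]
--     return nuage_map
-- ===== SOURCE B (Python) =====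
-- def _sfc_map_vsd_resource(nuage_resources):
--     keys = [r['name'].split('_')[-1] for r in nuage_resources]
--     return {k: [r for r, rk in zip(nuage_resources, keys) if rk == k]
--             for k in dict.fromkeys(keys)}
-- ===== Notes on version B (the rewrite author's own statement) =====
-- stated objective: alternative
-- what changed: B replaces A's incremental dict-of-buckets loop (lookup, append, re-store per element) with a declarative two-phase grouping: compute all suffix keys once, dedup them for first-occurrence order, and build each group by one filtering comprehension over the zipped input.
import Mathlib
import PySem

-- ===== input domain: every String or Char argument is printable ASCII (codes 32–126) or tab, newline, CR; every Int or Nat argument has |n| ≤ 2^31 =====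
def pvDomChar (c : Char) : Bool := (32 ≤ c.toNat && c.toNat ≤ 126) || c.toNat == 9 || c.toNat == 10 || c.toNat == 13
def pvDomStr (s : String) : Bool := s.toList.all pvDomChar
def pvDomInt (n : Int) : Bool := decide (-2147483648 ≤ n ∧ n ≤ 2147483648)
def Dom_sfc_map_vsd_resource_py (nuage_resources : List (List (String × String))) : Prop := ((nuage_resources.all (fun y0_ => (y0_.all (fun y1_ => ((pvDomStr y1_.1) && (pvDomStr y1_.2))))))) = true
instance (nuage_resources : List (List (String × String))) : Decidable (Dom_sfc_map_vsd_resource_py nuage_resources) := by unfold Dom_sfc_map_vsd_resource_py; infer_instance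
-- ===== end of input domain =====

-- B groups by the same suffix key but in a declarative two-phase way (keys once, dedup, then one
-- filter per distinct key) instead of A's incremental bucket-dict updates; same result, no speed claim.

-- ===== PORT A =====
-- shared key helper: nuage_resource['name'].split('_')[-1]; split(sep) never returns an empty list,
-- so the [-1] index never raises and the trailing .getD "" is unreachable; the dict lookup of 'name'
-- is totalized with getD "" — inputs where Python would raise KeyError are excluded by Pre_ below.
def pvKey (r : List (String × String)) : String :=
  (PySem.List.pyGet? ((PySem.Str.split? ((PySem.Dict.mk r).getD "name" "") "_").getD []) (-1)).getD ""

-- the loop body of A, named so the proofs can refer to it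
def pvStepA (nuage_map : PySem.Dict String (List (List (String × String))))
    (nuage_resource : List (String × String)) : PySem.Dict String (List (List (String × String))) :=
  let resource_id := pvKey nuage_resource
  -- `if nuage_map.get(resource_id):` — truthy iff present with a nonempty list
  match nuage_map.get? resource_id with
  | some (x :: resource_list) =>
      nuage_map.insert resource_id ((x :: resource_list) ++ [nuage_resource])
  | _ => nuage_map.insert resource_id [nuage_resource]

def sfc_map_vsd_resource_py (nuage_resources : List (List (String × String))) : List (String × List (List (String × String))) :=
  (nuage_resources.foldl pvStepA PySem.Dict.empty).items

-- ===== PORT B =====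
def sfc_map_vsd_resource_py_alt (nuage_resources : List (List (String × String))) : List (String × List (List (String × String))) :=
  let keys := nuage_resources.map pvKey
  (PySem.List.dedup keys).map
    (fun k => (k, ((nuage_resources.zip keys).filter (fun p => p.2 == k)).map (fun p => p.1)))

-- ===== PRECONDITION & SPEC =====
-- Pre_ excludes exactly the inputs where a resource dict lacks the key 'name': there Python A
-- (and B alike) raises KeyError instead of returning.
def Pre_sfc_map_vsd_resource_py (nuage_resources : List (List (String × String))) : Prop :=
  ∀ r ∈ nuage_resources, (PySem.Dict.mk r).contains "name" = true
instance (nuage_resources : List (List (String × String))) : Decidable (Pre_sfc_map_vsd_resource_py nuage_resources) := by unfold Pre_sfc_map_vsd_resource_py; infer_instance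

def pvWitness_sfc_map_vsd_resource_py : (List (List (String × String))) :=
  [[("name", "ab_k1")], [("name", "cd_k2")], [("name", "ef_k1")]]

def Spec_sfc_map_vsd_resource_py (nuage_resources : List (List (String × String))) (out : List (String × List (List (String × String)))) : Prop := out = sfc_map_vsd_resource_py_alt nuage_resources
instance (nuage_resources : List (List (String × String))) (out : List (String × List (List (String × String)))) : Decidable (Spec_sfc_map_vsd_resource_py nuage_resources out) := by unfold Spec_sfc_map_vsd_resource_py; infer_instance

-- ===== CLAIM (what is proved, stated in full; the proofs are below) =====
def Claim_equal_sfc_map_vsd_resource_py : Prop := ∀ (nuage_resources : List (List (String × String))), Dom_sfc_map_vsd_resource_py nuage_resources → Pre_sfc_map_vsd_resource_py nuage_resources → Spec_sfc_map_vsd_resource_py nuage_resources (sfc_map_vsd_resource_py nuage_resources)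

-- ===== LEMMAS AND PROOFS =====

-- the common grouped shape both ports compute
def pvGrouped (xs : List (List (String × String))) : List (String × List (List (String × String))) :=
  (PySem.List.dedup (xs.map pvKey)).map (fun k => (k, xs.filter (fun r => pvKey r == k)))

lemma zip_keys_filter (xs : List (List (String × String))) (k : String) :
    ((xs.zip (xs.map pvKey)).filter (fun p => p.2 == k)).map (fun p => p.1)
      = xs.filter (fun r => pvKey r == k) := by
  induction xs with
  | nil => rfl
  | cons r xs ih =>
      simp only [List.map_cons, List.zip_cons_cons, List.filter_cons]
      by_cases h : pvKey r == k
      · simp [h, ih]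
      · simp [h, ih]

lemma alt_eq_grouped (xs : List (List (String × String))) :
    sfc_map_vsd_resource_py_alt xs = pvGrouped xs := by
  simp [sfc_map_vsd_resource_py_alt, pvGrouped, zip_keys_filter]

lemma keys_mk_grouped (xs : List (List (String × String))) :
    (PySem.Dict.mk (pvGrouped xs)).keys = PySem.List.dedup (xs.map pvKey) := by
  simp [PySem.Dict.keys, pvGrouped, List.map_map, Function.comp_def]

lemma dedup_append_singleton {α : Type} [DecidableEq α] (l : List α) (a : α) :
    PySem.List.dedup (l ++ [a])
      = if a ∈ PySem.List.dedup l then PySem.List.dedup l else PySem.List.dedup l ++ [a] := by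
  simp only [PySem.List.dedup_eq_ofList, PySem.Set.ofList_eq_foldl, List.foldl_append,
    List.foldl_cons, List.foldl_nil]
  simp [PySem.Set.add, PySem.Set.contains]

lemma foldl_eq_mk_grouped (xs : List (List (String × String))) :
    xs.foldl pvStepA PySem.Dict.empty = PySem.Dict.mk (pvGrouped xs) := by
  induction xs using List.reverseRecOn with
  | nil => rfl
  | append_singleton xs x ih =>
      rw [List.foldl_append, List.foldl_cons, List.foldl_nil, ih]
      have hnd : (PySem.Dict.mk (pvGrouped xs)).keys.Nodup := by
        rw [keys_mk_grouped]; exact PySem.List.nodup_dedup _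
      by_cases hk : pvKey x ∈ xs.map pvKey
      · -- the key already has a bucket
        have hmemd : pvKey x ∈ PySem.List.dedup (xs.map pvKey) :=
          (PySem.List.mem_dedup _ _).2 hk
        have hget : (PySem.Dict.mk (pvGrouped xs)).get? (pvKey x)
            = some (xs.filter (fun r => pvKey r == pvKey x)) := by
          refine PySem.Dict.get?_of_mem_items _ ?_ hnd
          show (pvKey x, xs.filter (fun r => pvKey r == pvKey x)) ∈ pvGrouped xs
          exact List.mem_map.2 ⟨pvKey x, hmemd, rfl⟩
        obtain ⟨r, hr, hrk⟩ := List.mem_map.1 hk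
        have hne : xs.filter (fun r => pvKey r == pvKey x) ≠ [] := by
          intro hnil
          have : r ∈ xs.filter (fun r => pvKey r == pvKey x) :=
            List.mem_filter.2 ⟨hr, by simp [hrk]⟩
          simp [hnil] at this
        obtain ⟨y, l, hyl⟩ : ∃ y l, xs.filter (fun r => pvKey r == pvKey x) = y :: l := by
          cases h : xs.filter (fun r => pvKey r == pvKey x) with
          | nil => exact absurd h hne
          | cons y l => exact ⟨y, l, rfl⟩
        have hcont : (PySem.Dict.mk (pvGrouped xs)).contains (pvKey x) = true := by
          rw [PySem.Dict.contains_iff_mem_keys, keys_mk_grouped]; exact hmemd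
        simp only [pvStepA, hget, hyl]
        apply PySem.Dict.ext
        rw [PySem.Dict.items_insert, if_pos hcont]
        show (pvGrouped xs).map _ = (PySem.Dict.mk (pvGrouped (xs ++ [x]))).items
        have hded : PySem.List.dedup ((xs ++ [x]).map pvKey) = PySem.List.dedup (xs.map pvKey) := by
          rw [List.map_append, List.map_cons, List.map_nil, dedup_append_singleton,
            if_pos hmemd]
        show (pvGrouped xs).map _ = pvGrouped (xs ++ [x])
        simp only [pvGrouped, hded, List.map_map]
        apply List.map_congr_left
        intro k _
        by_cases hkk : k = pvKey x
        · subst hkk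
          simp [← hyl, List.filter_append]
        · have hxk : (pvKey x == k) = false := by simp [Ne.symm hkk]
          simp [List.filter_append, hxk, hkk]
      · -- a fresh key: the bucket is appended
        have hget : (PySem.Dict.mk (pvGrouped xs)).get? (pvKey x) = none := by
          rw [PySem.Dict.get?_eq_none_iff_not_mem_keys, keys_mk_grouped]
          intro h; exact hk ((PySem.List.mem_dedup _ _).1 h)
        have hcont : (PySem.Dict.mk (pvGrouped xs)).contains (pvKey x) = false := by
          rw [PySem.Dict.contains_eq_isSome_get?, hget]; rfl
        simp only [pvStepA, hget]
        apply PySem.Dict.ext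
        rw [PySem.Dict.items_insert, hcont]
        simp only [Bool.false_eq_true, if_false]
        show (pvGrouped xs) ++ [(pvKey x, [x])] = (PySem.Dict.mk (pvGrouped (xs ++ [x]))).items
        have hded : PySem.List.dedup (xs.map pvKey ++ [pvKey x])
            = PySem.List.dedup (xs.map pvKey) ++ [pvKey x] := by
          rw [dedup_append_singleton, if_neg (fun h => hk ((PySem.List.mem_dedup _ _).1 h))]
        have hfilnil : xs.filter (fun r => pvKey r == pvKey x) = [] := by
          rw [List.filter_eq_nil_iff]
          intro r hr hrk
          exact hk (List.mem_map.2 ⟨r, hr, by simpa using hrk⟩)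
        show (pvGrouped xs) ++ [(pvKey x, [x])] = pvGrouped (xs ++ [x])
        simp only [pvGrouped, List.map_append, List.map_cons, List.map_nil, hded]
        refine congrArg₂ (· ++ ·) ?_ ?_
        · apply List.map_congr_left
          intro k hkd
          have hkx : ¬ (pvKey x == k) := by
            intro h
            exact hk (by simpa [eq_of_beq h] using (PySem.List.mem_dedup _ _).1 hkd)
          simp [List.filter_append, hkx]
        · simp [List.filter_append, hfilnil]

-- ===== VERDICT (by name: the statement is the Claim_ definition above) =====
theorem sfc_map_vsd_resource_py_spec : Claim_equal_sfc_map_vsd_resource_py := by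
  intro xs _ _
  show sfc_map_vsd_resource_py xs = sfc_map_vsd_resource_py_alt xs
  rw [alt_eq_grouped, sfc_map_vsd_resource_py, foldl_eq_mk_grouped]
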